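-- pv_equiv track=rewrite | github.com/nizari08-max/SCLL-TOOL | format_detector.py | _find_data_sheet
-- ===== SOURCE A (Python) =====
-- def _find_data_sheet(sheet_names: list[str]) -> str:
--     lower = [s.lower() for s in sheet_names]
--     for candidate in ("line list", "linelist", "line_list", "lines", "data", "piping"):
--         for i, s in enumerate(lower):
--             if s == candidate:
--                 return sheet_names[i]
--     non_cover = [s for s in sheet_names if "cover" not in s.lower()]
--     return non_cover[0] if non_cover else sheet_names[0]
-- ===== SOURCE B (Python) =====
-- def _find_data_sheet(sheet_names: list[str]) -> str:
--     ranks = {c: i for i, c in enumerate(("line list", "linelist", "line_list", "lines", "data", "piping"))}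
--     best_rank, best_sheet = 7, ""
--     for s in sheet_names:
--         r = ranks.get(s.lower(), 7)
--         if r < best_rank:
--             best_rank, best_sheet = r, s
--     if best_rank < 7:
--         return best_sheet
--     for s in sheet_names:
--         if "cover" not in s.lower():
--             return s
--     return sheet_names[0]
-- ===== Notes on version B (the rewrite author's own statement) =====
-- stated objective: faster
-- what changed: Replaced A's six candidate-by-candidate early-return scans over the sheet list by a rank dictionary and one minimum-selecting pass over the sheets, with the fallback as an early-return loop instead of building a filtered list.
import Mathlib
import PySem

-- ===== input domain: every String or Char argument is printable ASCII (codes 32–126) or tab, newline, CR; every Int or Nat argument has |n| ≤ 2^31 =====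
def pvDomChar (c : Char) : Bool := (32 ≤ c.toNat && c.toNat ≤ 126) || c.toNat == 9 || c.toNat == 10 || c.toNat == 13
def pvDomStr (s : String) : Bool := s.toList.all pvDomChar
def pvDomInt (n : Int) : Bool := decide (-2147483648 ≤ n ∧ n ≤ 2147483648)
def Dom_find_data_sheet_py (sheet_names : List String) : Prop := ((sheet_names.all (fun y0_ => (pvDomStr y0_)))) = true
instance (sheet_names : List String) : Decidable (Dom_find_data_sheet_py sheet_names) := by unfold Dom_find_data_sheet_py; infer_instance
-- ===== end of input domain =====

-- B replaces A's six candidate-by-candidate early-return scans over the sheet list with a rank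
-- dictionary and one minimum-selecting pass (fallback as an early-return loop); alternative decomposition.


-- ===== PORT A =====
-- inner loop body of A: scan enumerate(lower) for the candidate, return sheet_names[i] on a hit
def pvTryCand (sheet_names : List String) (lower : List String) (candidate : String) : Option String :=
  ((PySem.List.enumerate lower).find? (fun p => p.2 == candidate)).map
    (fun p => PySem.List.pyGetD sheet_names p.1 "")

def find_data_sheet_py (sheet_names : List String) : String :=
  let lower := sheet_names.map PySem.Str.lower
  match ["line list", "linelist", "line_list", "lines", "data", "piping"].findSome?
      (pvTryCand sheet_names lower) with
  | some r => r
  | none =>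
    let non_cover := sheet_names.filter (fun s => !(PySem.Str.isIn "cover" (PySem.Str.lower s)))
    -- 'non_cover[0] if non_cover else sheet_names[0]'; sheet_names[0] on [] raises and is excluded by Pre_
    if non_cover ≠ [] then PySem.List.pyGetD non_cover 0 "" else PySem.List.pyGetD sheet_names 0 ""

-- ===== PORT B =====
def find_data_sheet_py_alt (sheet_names : List String) : String :=
  let ranks : PySem.Dict String Int :=
    (PySem.List.enumerate ["line list", "linelist", "line_list", "lines", "data", "piping"]).foldl
      (fun d p => d.insert p.2 p.1) PySem.Dict.empty
  let best := sheet_names.foldl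
    (fun (b : Int × String) s =>
      let r := ranks.getD (PySem.Str.lower s) 7
      if r < b.1 then (r, s) else b) (7, "")
  if best.1 < 7 then best.2
  else
    match sheet_names.find? (fun s => !(PySem.Str.isIn "cover" (PySem.Str.lower s))) with
    | some s => s
    | none => PySem.List.pyGetD sheet_names 0 ""

-- ===== PRECONDITION & SPEC =====
-- Pre_ excludes only the empty list, on which A raises IndexError (sheet_names[0]).
def Pre_find_data_sheet_py (sheet_names : List String) : Prop := sheet_names ≠ []
instance (sheet_names : List String) : Decidable (Pre_find_data_sheet_py sheet_names) := by
  unfold Pre_find_data_sheet_py; infer_instance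

def pvWitness_find_data_sheet_py : List String := ["Cover", "Line List", "Data"]

def Spec_find_data_sheet_py (sheet_names : List String) (out : String) : Prop := out = find_data_sheet_py_alt sheet_names
instance (sheet_names : List String) (out : String) : Decidable (Spec_find_data_sheet_py sheet_names out) := by unfold Spec_find_data_sheet_py; infer_instance

-- ===== CLAIM (what is proved, stated in full; the proofs are below) =====
def Claim_equal_find_data_sheet_py : Prop := ∀ (sheet_names : List String), Dom_find_data_sheet_py sheet_names → Pre_find_data_sheet_py sheet_names → Spec_find_data_sheet_py sheet_names (find_data_sheet_py sheet_names)

-- ===== LEMMAS AND PROOFS =====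

-- rank of a lowercased sheet name among the priority candidates; 7 = no match
def pvRank0 (k : String) : Int :=
  if "line list" == k then 0
  else if "linelist" == k then 1
  else if "line_list" == k then 2
  else if "lines" == k then 3
  else if "data" == k then 4
  else if "piping" == k then 5
  else 7

def pvRank (s : String) : Int := pvRank0 (PySem.Str.lower s)

-- B's loop step, with the dict lookup replaced by pvRank
def pvStep (b : Int × String) (s : String) : Int × String :=
  if pvRank s < b.1 then (pvRank s, s) else b

lemma getD_ranks (k : String) :
    PySem.Dict.getD
      ((PySem.List.enumerate ["line list", "linelist", "line_list", "lines", "data", "piping"]).foldl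
        (fun d p => d.insert p.2 p.1) PySem.Dict.empty) k 7 = pvRank0 k := by
  have h : ((PySem.List.enumerate ["line list", "linelist", "line_list", "lines", "data", "piping"]).foldl
      (fun (d : PySem.Dict String Int) p => d.insert p.2 p.1) PySem.Dict.empty) =
      PySem.Dict.mk [("line list",0),("linelist",1),("line_list",2),("lines",3),("data",4),("piping",5)] := by decide
  rw [h]
  simp only [PySem.Dict.getD_eq_get?_getD, PySem.Dict.get?_mk_cons]
  unfold pvRank0
  split_ifs <;> simp_all [show (PySem.Dict.mk ([] : List (String × Int))).get? k = none from rfl]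

lemma alt_eq (l : List String) :
    find_data_sheet_py_alt l =
      (if (l.foldl pvStep (7, "")).1 < 7 then (l.foldl pvStep (7, "")).2
       else
        match l.find? (fun s => !(PySem.Str.isIn "cover" (PySem.Str.lower s))) with
        | some s => s
        | none => PySem.List.pyGetD l 0 "") := by
  have hfun : (fun (b : Int × String) s =>
      let r := PySem.Dict.getD
        ((PySem.List.enumerate ["line list", "linelist", "line_list", "lines", "data", "piping"]).foldl
          (fun d p => d.insert p.2 p.1) PySem.Dict.empty) (PySem.Str.lower s) 7
      if r < b.1 then (r, s) else b) = pvStep := by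
    funext b s
    simp only [getD_ranks]
    rfl
  simp only [find_data_sheet_py_alt, hfun]

lemma pvRank_iff (s : String) :
    (pvRank s = 0 ↔ PySem.Str.lower s = "line list") ∧
    (pvRank s = 1 ↔ PySem.Str.lower s = "linelist") ∧
    (pvRank s = 2 ↔ PySem.Str.lower s = "line_list") ∧
    (pvRank s = 3 ↔ PySem.Str.lower s = "lines") ∧
    (pvRank s = 4 ↔ PySem.Str.lower s = "data") ∧
    (pvRank s = 5 ↔ PySem.Str.lower s = "piping") := by
  unfold pvRank pvRank0
  split_ifs with h0 h1 h2 h3 h4 h5 <;>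
    simp only [beq_iff_eq] at * <;>
    first
      | simp [← h0] | simp [← h1] | simp [← h2] | simp [← h3] | simp [← h4] | simp [← h5]
      | (simp; exact ⟨fun hc => h0 hc.symm, fun hc => h1 hc.symm, fun hc => h2 hc.symm,
          fun hc => h3 hc.symm, fun hc => h4 hc.symm, fun hc => h5 hc.symm⟩)

lemma pvRank_mem (s : String) :
    pvRank s = 0 ∨ pvRank s = 1 ∨ pvRank s = 2 ∨ pvRank s = 3 ∨ pvRank s = 4 ∨ pvRank s = 5 ∨ pvRank s = 7 := by
  unfold pvRank pvRank0; split_ifs <;> simp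

lemma fold_inv (l : List String) : ∀ (b : Int × String),
    (l.foldl pvStep b = b ∧ ∀ s ∈ l, b.1 ≤ pvRank s) ∨
    (∃ l1 x l2, l = l1 ++ x :: l2 ∧ l.foldl pvStep b = (pvRank x, x) ∧ pvRank x < b.1 ∧
      (∀ s ∈ l1, pvRank x < pvRank s) ∧ (∀ s ∈ l2, pvRank x ≤ pvRank s)) := by
  induction l with
  | nil => intro b; left; simp
  | cons s t ih =>
    intro b
    by_cases h : pvRank s < b.1
    · have hstep : pvStep b s = (pvRank s, s) := by simp [pvStep, h]
      rcases ih (pvRank s, s) with ⟨heq, hall⟩ | ⟨l1, x, l2, hdec, heq, hlt, h1, h2⟩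
      · right
        exact ⟨[], s, t, by simp, by simp [List.foldl_cons, hstep, heq], h, by simp,
          fun u hu => hall u hu⟩
      · right
        refine ⟨s :: l1, x, l2, by rw [hdec]; simp, by simp [List.foldl_cons, hstep, heq],
          lt_trans hlt h, ?_, h2⟩
        intro u hu
        rcases List.mem_cons.mp hu with rfl | hu
        · exact hlt
        · exact h1 u hu
    · have hstep : pvStep b s = b := by simp [pvStep, h]
      rcases ih b with ⟨heq, hall⟩ | ⟨l1, x, l2, hdec, heq, hlt, h1, h2⟩
      · left
        refine ⟨by simp [List.foldl_cons, hstep, heq], ?_⟩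
        intro u hu
        rcases List.mem_cons.mp hu with rfl | hu
        · omega
        · exact hall u hu
      · right
        refine ⟨s :: l1, x, l2, by rw [hdec]; simp, by simp [List.foldl_cons, hstep, heq], hlt, ?_, h2⟩
        intro u hu
        rcases List.mem_cons.mp hu with rfl | hu
        · omega
        · exact h1 u hu

lemma find?_enum_none {α : Type} (q : α → Bool) :
    ∀ (xs : List α) (n : Int),
      (PySem.List.enumerate xs n).find? (fun p => q p.2) = none → ∀ a ∈ xs, q a = false := by
  intro xs
  induction xs with
  | nil => intro n _ a ha; simp at ha
  | cons y ys ih =>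
    intro n h a ha
    rw [PySem.List.enumerate_cons, List.find?_cons] at h
    by_cases hq : q y
    · simp [hq] at h
    · simp only [hq] at h
      rcases List.mem_cons.mp ha with rfl | ha
      · simpa using hq
      · exact ih (n + 1) (by simpa using h) a ha

lemma find?_enum_some {α : Type} (q : α → Bool) :
    ∀ (xs : List α) (n : Int) (i : Int) (a : α),
      (PySem.List.enumerate xs n).find? (fun p => q p.2) = some (i, a) →
      ∃ l1 l2, xs = l1 ++ a :: l2 ∧ i = n + l1.length ∧ q a = true ∧ ∀ b ∈ l1, q b = false := by
  intro xs
  induction xs with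
  | nil => intro n i a h; simp [PySem.List.enumerate_nil] at h
  | cons y ys ih =>
    intro n i a h
    rw [PySem.List.enumerate_cons, List.find?_cons] at h
    by_cases hq : q y
    · simp only [hq] at h
      obtain ⟨hi, ha⟩ : n = i ∧ y = a := by
        have := h
        simp at this
        exact ⟨this.1, this.2⟩
      subst hi; subst ha
      exact ⟨[], ys, by simp, by simp, hq, by simp⟩
    · simp only [hq] at h
      obtain ⟨l1, l2, hdec, hi, hqa, hall⟩ := ih (n + 1) i a (by simpa using h)
      refine ⟨y :: l1, l2, by rw [hdec]; simp, ?_, hqa, ?_⟩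
      · simp [hi]; omega
      · intro b hb
        rcases List.mem_cons.mp hb with rfl | hb
        · simpa using hq
        · exact hall b hb

lemma tryCand_none {l : List String} {c : String}
    (h : pvTryCand l (l.map PySem.Str.lower) c = none) :
    ∀ s ∈ l, PySem.Str.lower s ≠ c := by
  intro s hs
  unfold pvTryCand at h
  rw [Option.map_eq_none_iff] at h
  have := find?_enum_none (fun a => a == c) (l.map PySem.Str.lower) 0 h (PySem.Str.lower s)
    (List.mem_map_of_mem hs)
  simpa using this

lemma tryCand_some {l : List String} {c x : String}
    (h : pvTryCand l (l.map PySem.Str.lower) c = some x) :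
    ∃ l1 l2, l = l1 ++ x :: l2 ∧ PySem.Str.lower x = c ∧ ∀ s ∈ l1, PySem.Str.lower s ≠ c := by
  unfold pvTryCand at h
  rw [Option.map_eq_some_iff] at h
  obtain ⟨⟨i, a⟩, hfind, hval⟩ := h
  obtain ⟨m1, m2, hdec, hi, hqa, hall⟩ :=
    find?_enum_some (fun a => a == c) (l.map PySem.Str.lower) 0 i a hfind
  rw [List.map_eq_append_iff] at hdec
  obtain ⟨l1, l2', hl, hm1, hm2⟩ := hdec
  rw [List.map_eq_cons_iff] at hm2
  obtain ⟨y, t, hl2', hy, ht⟩ := hm2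
  subst hl2'
  have hlen : i = (l1.length : Int) := by rw [hi, ← hm1]; simp
  have hxval : x = y := by
    rw [← hval, hlen, hl]
    simp [PySem.List.pyGetD_natCast]
  subst hxval
  refine ⟨l1, t, hl, ?_, ?_⟩
  · rw [hy]; simpa using hqa
  · intro s hs
    have hmem : PySem.Str.lower s ∈ m1 := by rw [← hm1]; exact List.mem_map_of_mem hs
    have := hall _ hmem
    simpa using this

lemma firstMin_unique {m m' : Int} {x x' : String} {l1 l2 l1' l2' : List String}
    (h : l1 ++ x :: l2 = l1' ++ x' :: l2')
    (hx : pvRank x = m) (hx' : pvRank x' = m')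
    (h1 : ∀ s ∈ l1, m < pvRank s) (h1' : ∀ s ∈ l1', m' < pvRank s)
    (hall : ∀ s ∈ l1 ++ x :: l2, m ≤ pvRank s)
    (hall' : ∀ s ∈ l1' ++ x' :: l2', m' ≤ pvRank s) : x = x' := by
  have hmem : x' ∈ l1 ++ x :: l2 := by rw [h]; simp
  have hmem' : x ∈ l1' ++ x' :: l2' := by rw [← h]; simp
  have hm : m = m' := le_antisymm (hx' ▸ hall _ hmem) (hx ▸ hall' _ hmem')
  subst hm
  rcases lt_trichotomy l1.length l1'.length with hlt | heq | hgt
  · exfalso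
    have hget : (l1' ++ x' :: l2')[l1.length]? = some x := by
      rw [← h, List.getElem?_append_right (le_refl l1.length)]
      simp
    rw [List.getElem?_append_left hlt] at hget
    have := h1' x (List.mem_of_getElem? hget)
    omega
  · have := List.append_inj h (by omega)
    have h2 := this.2
    injection h2 with hxx _
  · exfalso
    have hget : (l1 ++ x :: l2)[l1'.length]? = some x' := by
      rw [h, List.getElem?_append_right (le_refl l1'.length)]
      simp
    rw [List.getElem?_append_left hgt] at hget
    have := h1 x' (List.mem_of_getElem? hget)
    omega

-- B's pass returns x when x is the first sheet of minimal rank j < 7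
lemma bridge (l : List String) (j : Int) (x : String) (hj : j < 7)
    (l1 l2 : List String) (hdec : l = l1 ++ x :: l2) (hx : pvRank x = j)
    (h1 : ∀ s ∈ l1, j < pvRank s) (hall : ∀ s ∈ l, j ≤ pvRank s) :
    (l.foldl pvStep (7, "")).1 < 7 ∧ (l.foldl pvStep (7, "")).2 = x := by
  rcases fold_inv l (7, "") with ⟨heq, hge⟩ | ⟨l1', x', l2', hdec', heq, hlt, h1', h2'⟩
  · exfalso
    have : (7 : Int) ≤ pvRank x := hge x (by rw [hdec]; simp)
    omega
  · have hll : l1' ++ x' :: l2' = l1 ++ x :: l2 := by rw [← hdec', ← hdec]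
    have hall2 : ∀ s ∈ l1' ++ x' :: l2', pvRank x' ≤ pvRank s := by
      intro s hs
      rcases List.mem_append.mp hs with hs1 | hs2
      · exact le_of_lt (h1' s hs1)
      · rcases List.mem_cons.mp hs2 with rfl | hs3
        · exact le_refl _
        · exact h2' s hs3
    have hall1 : ∀ s ∈ l1 ++ x :: l2, j ≤ pvRank s := by
      intro s hs; rw [← hdec] at hs; exact hall s hs
    have huniq : x' = x := firstMin_unique hll rfl hx h1' h1 hall2 hall1
    constructor
    · rw [heq]; simp [huniq, hx]; omega
    · rw [heq, huniq]

-- ===== VERDICT (by name: the statement is the Claim_ definition above) =====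
theorem find_data_sheet_py_spec : Claim_equal_find_data_sheet_py := by
  intro l hdom hpre
  unfold Spec_find_data_sheet_py
  rw [alt_eq]
  simp only [find_data_sheet_py]
  cases hc0 : pvTryCand l (l.map PySem.Str.lower) "line list" with
  | some x =>
    obtain ⟨l1, l2, hdec, hlow, hfirst⟩ := tryCand_some hc0
    have hrx : pvRank x = 0 := ((pvRank_iff x).1).mpr hlow
    have h1 : ∀ s ∈ l1, (0 : Int) < pvRank s := by
      intro s hs
      have hsl : s ∈ l := by rw [hdec]; exact List.mem_append.mpr (Or.inl hs)
      have d0 : pvRank s ≠ 0 := fun hh => hfirst s hs (((pvRank_iff s).1).mp hh)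
      rcases pvRank_mem s with h|h|h|h|h|h|h <;> omega
    have hall : ∀ s ∈ l, (0 : Int) ≤ pvRank s := by
      intro s hsl
      rcases pvRank_mem s with h|h|h|h|h|h|h <;> omega
    obtain ⟨hb1, hb2⟩ := bridge l 0 x (by norm_num) l1 l2 hdec hrx h1 hall
    simp only [List.findSome?_cons, hc0]
    rw [if_pos hb1, hb2]
  | none =>
  cases hc1 : pvTryCand l (l.map PySem.Str.lower) "linelist" with
  | some x =>
    obtain ⟨l1, l2, hdec, hlow, hfirst⟩ := tryCand_some hc1
    have hrx : pvRank x = 1 := ((pvRank_iff x).2.1).mpr hlow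
    have h1 : ∀ s ∈ l1, (1 : Int) < pvRank s := by
      intro s hs
      have hsl : s ∈ l := by rw [hdec]; exact List.mem_append.mpr (Or.inl hs)
      have d0 : pvRank s ≠ 0 := fun hh => tryCand_none hc0 s hsl (((pvRank_iff s).1).mp hh)
      have d1 : pvRank s ≠ 1 := fun hh => hfirst s hs (((pvRank_iff s).2.1).mp hh)
      rcases pvRank_mem s with h|h|h|h|h|h|h <;> omega
    have hall : ∀ s ∈ l, (1 : Int) ≤ pvRank s := by
      intro s hsl
      have d0 : pvRank s ≠ 0 := fun hh => tryCand_none hc0 s hsl (((pvRank_iff s).1).mp hh)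
      rcases pvRank_mem s with h|h|h|h|h|h|h <;> omega
    obtain ⟨hb1, hb2⟩ := bridge l 1 x (by norm_num) l1 l2 hdec hrx h1 hall
    simp only [List.findSome?_cons, hc0, hc1]
    rw [if_pos hb1, hb2]
  | none =>
  cases hc2 : pvTryCand l (l.map PySem.Str.lower) "line_list" with
  | some x =>
    obtain ⟨l1, l2, hdec, hlow, hfirst⟩ := tryCand_some hc2
    have hrx : pvRank x = 2 := ((pvRank_iff x).2.2.1).mpr hlow
    have h1 : ∀ s ∈ l1, (2 : Int) < pvRank s := by
      intro s hs
      have hsl : s ∈ l := by rw [hdec]; exact List.mem_append.mpr (Or.inl hs)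
      have d0 : pvRank s ≠ 0 := fun hh => tryCand_none hc0 s hsl (((pvRank_iff s).1).mp hh)
      have d1 : pvRank s ≠ 1 := fun hh => tryCand_none hc1 s hsl (((pvRank_iff s).2.1).mp hh)
      have d2 : pvRank s ≠ 2 := fun hh => hfirst s hs (((pvRank_iff s).2.2.1).mp hh)
      rcases pvRank_mem s with h|h|h|h|h|h|h <;> omega
    have hall : ∀ s ∈ l, (2 : Int) ≤ pvRank s := by
      intro s hsl
      have d0 : pvRank s ≠ 0 := fun hh => tryCand_none hc0 s hsl (((pvRank_iff s).1).mp hh)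
      have d1 : pvRank s ≠ 1 := fun hh => tryCand_none hc1 s hsl (((pvRank_iff s).2.1).mp hh)
      rcases pvRank_mem s with h|h|h|h|h|h|h <;> omega
    obtain ⟨hb1, hb2⟩ := bridge l 2 x (by norm_num) l1 l2 hdec hrx h1 hall
    simp only [List.findSome?_cons, hc0, hc1, hc2]
    rw [if_pos hb1, hb2]
  | none =>
  cases hc3 : pvTryCand l (l.map PySem.Str.lower) "lines" with
  | some x =>
    obtain ⟨l1, l2, hdec, hlow, hfirst⟩ := tryCand_some hc3
    have hrx : pvRank x = 3 := ((pvRank_iff x).2.2.2.1).mpr hlow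
    have h1 : ∀ s ∈ l1, (3 : Int) < pvRank s := by
      intro s hs
      have hsl : s ∈ l := by rw [hdec]; exact List.mem_append.mpr (Or.inl hs)
      have d0 : pvRank s ≠ 0 := fun hh => tryCand_none hc0 s hsl (((pvRank_iff s).1).mp hh)
      have d1 : pvRank s ≠ 1 := fun hh => tryCand_none hc1 s hsl (((pvRank_iff s).2.1).mp hh)
      have d2 : pvRank s ≠ 2 := fun hh => tryCand_none hc2 s hsl (((pvRank_iff s).2.2.1).mp hh)
      have d3 : pvRank s ≠ 3 := fun hh => hfirst s hs (((pvRank_iff s).2.2.2.1).mp hh)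
      rcases pvRank_mem s with h|h|h|h|h|h|h <;> omega
    have hall : ∀ s ∈ l, (3 : Int) ≤ pvRank s := by
      intro s hsl
      have d0 : pvRank s ≠ 0 := fun hh => tryCand_none hc0 s hsl (((pvRank_iff s).1).mp hh)
      have d1 : pvRank s ≠ 1 := fun hh => tryCand_none hc1 s hsl (((pvRank_iff s).2.1).mp hh)
      have d2 : pvRank s ≠ 2 := fun hh => tryCand_none hc2 s hsl (((pvRank_iff s).2.2.1).mp hh)
      rcases pvRank_mem s with h|h|h|h|h|h|h <;> omega
    obtain ⟨hb1, hb2⟩ := bridge l 3 x (by norm_num) l1 l2 hdec hrx h1 hall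
    simp only [List.findSome?_cons, hc0, hc1, hc2, hc3]
    rw [if_pos hb1, hb2]
  | none =>
  cases hc4 : pvTryCand l (l.map PySem.Str.lower) "data" with
  | some x =>
    obtain ⟨l1, l2, hdec, hlow, hfirst⟩ := tryCand_some hc4
    have hrx : pvRank x = 4 := ((pvRank_iff x).2.2.2.2.1).mpr hlow
    have h1 : ∀ s ∈ l1, (4 : Int) < pvRank s := by
      intro s hs
      have hsl : s ∈ l := by rw [hdec]; exact List.mem_append.mpr (Or.inl hs)
      have d0 : pvRank s ≠ 0 := fun hh => tryCand_none hc0 s hsl (((pvRank_iff s).1).mp hh)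
      have d1 : pvRank s ≠ 1 := fun hh => tryCand_none hc1 s hsl (((pvRank_iff s).2.1).mp hh)
      have d2 : pvRank s ≠ 2 := fun hh => tryCand_none hc2 s hsl (((pvRank_iff s).2.2.1).mp hh)
      have d3 : pvRank s ≠ 3 := fun hh => tryCand_none hc3 s hsl (((pvRank_iff s).2.2.2.1).mp hh)
      have d4 : pvRank s ≠ 4 := fun hh => hfirst s hs (((pvRank_iff s).2.2.2.2.1).mp hh)
      rcases pvRank_mem s with h|h|h|h|h|h|h <;> omega
    have hall : ∀ s ∈ l, (4 : Int) ≤ pvRank s := by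
      intro s hsl
      have d0 : pvRank s ≠ 0 := fun hh => tryCand_none hc0 s hsl (((pvRank_iff s).1).mp hh)
      have d1 : pvRank s ≠ 1 := fun hh => tryCand_none hc1 s hsl (((pvRank_iff s).2.1).mp hh)
      have d2 : pvRank s ≠ 2 := fun hh => tryCand_none hc2 s hsl (((pvRank_iff s).2.2.1).mp hh)
      have d3 : pvRank s ≠ 3 := fun hh => tryCand_none hc3 s hsl (((pvRank_iff s).2.2.2.1).mp hh)
      rcases pvRank_mem s with h|h|h|h|h|h|h <;> omega
    obtain ⟨hb1, hb2⟩ := bridge l 4 x (by norm_num) l1 l2 hdec hrx h1 hall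
    simp only [List.findSome?_cons, hc0, hc1, hc2, hc3, hc4]
    rw [if_pos hb1, hb2]
  | none =>
  cases hc5 : pvTryCand l (l.map PySem.Str.lower) "piping" with
  | some x =>
    obtain ⟨l1, l2, hdec, hlow, hfirst⟩ := tryCand_some hc5
    have hrx : pvRank x = 5 := ((pvRank_iff x).2.2.2.2.2).mpr hlow
    have h1 : ∀ s ∈ l1, (5 : Int) < pvRank s := by
      intro s hs
      have hsl : s ∈ l := by rw [hdec]; exact List.mem_append.mpr (Or.inl hs)
      have d0 : pvRank s ≠ 0 := fun hh => tryCand_none hc0 s hsl (((pvRank_iff s).1).mp hh)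
      have d1 : pvRank s ≠ 1 := fun hh => tryCand_none hc1 s hsl (((pvRank_iff s).2.1).mp hh)
      have d2 : pvRank s ≠ 2 := fun hh => tryCand_none hc2 s hsl (((pvRank_iff s).2.2.1).mp hh)
      have d3 : pvRank s ≠ 3 := fun hh => tryCand_none hc3 s hsl (((pvRank_iff s).2.2.2.1).mp hh)
      have d4 : pvRank s ≠ 4 := fun hh => tryCand_none hc4 s hsl (((pvRank_iff s).2.2.2.2.1).mp hh)
      have d5 : pvRank s ≠ 5 := fun hh => hfirst s hs (((pvRank_iff s).2.2.2.2.2).mp hh)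
      rcases pvRank_mem s with h|h|h|h|h|h|h <;> omega
    have hall : ∀ s ∈ l, (5 : Int) ≤ pvRank s := by
      intro s hsl
      have d0 : pvRank s ≠ 0 := fun hh => tryCand_none hc0 s hsl (((pvRank_iff s).1).mp hh)
      have d1 : pvRank s ≠ 1 := fun hh => tryCand_none hc1 s hsl (((pvRank_iff s).2.1).mp hh)
      have d2 : pvRank s ≠ 2 := fun hh => tryCand_none hc2 s hsl (((pvRank_iff s).2.2.1).mp hh)
      have d3 : pvRank s ≠ 3 := fun hh => tryCand_none hc3 s hsl (((pvRank_iff s).2.2.2.1).mp hh)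
      have d4 : pvRank s ≠ 4 := fun hh => tryCand_none hc4 s hsl (((pvRank_iff s).2.2.2.2.1).mp hh)
      rcases pvRank_mem s with h|h|h|h|h|h|h <;> omega
    obtain ⟨hb1, hb2⟩ := bridge l 5 x (by norm_num) l1 l2 hdec hrx h1 hall
    simp only [List.findSome?_cons, hc0, hc1, hc2, hc3, hc4, hc5]
    rw [if_pos hb1, hb2]
  | none =>
  simp only [List.findSome?_cons, hc0, hc1, hc2, hc3, hc4, hc5, List.findSome?_nil]
  have hall7 : ∀ s ∈ l, pvRank s = 7 := by
    intro s hsl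
    have d0 : pvRank s ≠ 0 := fun hh => tryCand_none hc0 s hsl (((pvRank_iff s).1).mp hh)
    have d1 : pvRank s ≠ 1 := fun hh => tryCand_none hc1 s hsl (((pvRank_iff s).2.1).mp hh)
    have d2 : pvRank s ≠ 2 := fun hh => tryCand_none hc2 s hsl (((pvRank_iff s).2.2.1).mp hh)
    have d3 : pvRank s ≠ 3 := fun hh => tryCand_none hc3 s hsl (((pvRank_iff s).2.2.2.1).mp hh)
    have d4 : pvRank s ≠ 4 := fun hh => tryCand_none hc4 s hsl (((pvRank_iff s).2.2.2.2.1).mp hh)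
    have d5 : pvRank s ≠ 5 := fun hh => tryCand_none hc5 s hsl (((pvRank_iff s).2.2.2.2.2).mp hh)
    rcases pvRank_mem s with h|h|h|h|h|h|h <;> omega
  have hfold : l.foldl pvStep (7, "") = (7, "") := by
    rcases fold_inv l (7, "") with ⟨heq, _⟩ | ⟨l1x, xx, l2x, hdecx, heqx, hltx, _, _⟩
    · exact heq
    · exfalso
      have h7 := hall7 xx (by rw [hdecx]; simp)
      simp at hltx
      omega
  rw [hfold]
  have h7 : ¬((((7 : Int), ("" : String)).1) < 7) := by norm_num
  rw [if_neg h7]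
  rw [← List.head?_filter]
  cases hf : l.filter (fun s => !(PySem.Str.isIn "cover" (PySem.Str.lower s))) with
  | nil => simp
  | cons y ys => simp [PySem.List.pyGetD_zero_cons]
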